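-- pv_equiv track=rewrite | github.com/omvriio/giia-ENSAM_IN_LOCATION | ensam-in/localisator.py | remove_occurrences
-- ===== SOURCE A (Python) =====
-- def remove_occurrences(input_array): #a function that returns the classes detected with their occurences
--     occurrence_dict = {}
--     output_array = []
--     for item in input_array:
--         if item not in occurrence_dict:
--             occurrence_dict[item] = 1
--         else:
--             occurrence_dict[item] += 1
--     for key, value in occurrence_dict.items():
--         output_array.append((key, value))
--     return output_array
-- ===== SOURCE B (Python) =====
-- def remove_occurrences(input_array):
--     output = []
--     position = {}
--     for item in input_array:
--         i = position.get(item)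
--         if i is None:
--             position[item] = len(output)
--             output.append((item, 1))
--         else:
--             output[i] = (item, output[i][1] + 1)
--     return output
-- ===== Notes on version B (the rewrite author's own statement) =====
-- stated objective: alternative
-- what changed: Instead of accumulating a count dict and emitting its items afterwards, B builds the (item, count) output list directly in one pass, keeping an item-to-output-index map and bumping the pair at that index in place.
import Mathlib
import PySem

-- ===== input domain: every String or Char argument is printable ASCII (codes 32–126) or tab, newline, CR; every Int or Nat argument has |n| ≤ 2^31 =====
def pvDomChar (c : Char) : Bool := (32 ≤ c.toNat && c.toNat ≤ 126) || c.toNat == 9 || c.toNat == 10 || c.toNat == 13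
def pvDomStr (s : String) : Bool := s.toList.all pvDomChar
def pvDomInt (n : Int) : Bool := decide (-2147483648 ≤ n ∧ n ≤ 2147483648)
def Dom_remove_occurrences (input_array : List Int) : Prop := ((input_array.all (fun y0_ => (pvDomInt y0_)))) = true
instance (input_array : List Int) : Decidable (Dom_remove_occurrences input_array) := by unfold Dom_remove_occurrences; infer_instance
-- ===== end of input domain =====

-- B builds the (item, count) output list directly, bumping the pair at the item's stored output index instead of accumulating a count dict and emitting items afterwards; objective: alternative (same values, different algorithm).

-- ===== PORT A =====
def remove_occurrences (input_array : List Int) : List (Int × Int) :=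
  let occurrence_dict : PySem.Dict Int Int :=
    input_array.foldl (fun d item =>
      if d.contains item = false then d.insert item 1
      else d.modify item 0 (· + 1)) PySem.Dict.empty
  occurrence_dict.items.foldl (fun out kv => out ++ [kv]) []

-- ===== PORT B =====
-- loop body of Source B: position.get(item) decides between appending (item, 1) and
-- bumping the count of the pair output[i]; the inner none-branch is Python's
-- IndexError on output[i], unreachable because stored indices are < len(output).
def pvStepB (st : List (Int × Int) × PySem.Dict Int Int) (item : Int) : List (Int × Int) × PySem.Dict Int Int :=
  match st.2.get? item with
  | none => (st.1 ++ [(item, 1)], st.2.insert item (st.1.length : Int))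
  | some i =>
    match PySem.List.pyGet? st.1 i with
    | some p => (st.1.set i.toNat (item, p.2 + 1), st.2)
    | none => (st.1, st.2)

def remove_occurrences_alt (input_array : List Int) : List (Int × Int) :=
  (input_array.foldl pvStepB ([], PySem.Dict.empty)).1

-- ===== PRECONDITION & SPEC =====
def Spec_remove_occurrences (input_array : List Int) (out : List (Int × Int)) : Prop := out = remove_occurrences_alt input_array
instance (input_array : List Int) (out : List (Int × Int)) : Decidable (Spec_remove_occurrences input_array out) := by unfold Spec_remove_occurrences; infer_instance

-- ===== CLAIM (what is proved, stated in full; the proofs are below) =====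
def Claim_equal_remove_occurrences : Prop := ∀ (input_array : List Int), Dom_remove_occurrences input_array → Spec_remove_occurrences input_array (remove_occurrences input_array)

-- ===== LEMMAS AND PROOFS =====

-- A's accumulation step is exactly Counter's step: on an absent key, modify inserts f(dflt) = 0+1 = 1.
theorem stepA_eq_counter_step (d : PySem.Dict Int Int) (x : Int) :
    (if d.contains x = false then d.insert x 1 else d.modify x 0 (· + 1)) = d.modify x 0 (· + 1) := by
  by_cases h : d.contains x = false
  · simp only [h, if_true, PySem.Dict.modify, PySem.Dict.getD,
      (PySem.Dict.get?_eq_none_iff_contains d x).mpr h, Option.getD_none, zero_add]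
  · simp [h]

-- Loop invariant of B: after processing l, the output list is the distinct items of l
-- (first-appearance order) paired with their counts in l, and the position dict maps
-- each seen item to its index in that list.
theorem invB (l : List Int) :
    (l.foldl pvStepB ([], PySem.Dict.empty)).1
      = (PySem.Set.ofList l).map (fun x => (x, (l.count x : Int)))
    ∧ ∀ x : Int, (l.foldl pvStepB ([], PySem.Dict.empty)).2.get? x
      = if x ∈ l then some (((PySem.Set.ofList l).idxOf x : Int)) else none := by
  induction l using List.reverseRecOn with
  | nil =>
    refine ⟨by simp [PySem.Set.ofList], fun x => by simp [PySem.Dict.empty, PySem.Dict.get?]⟩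
  | append_singleton s a ih =>
    obtain ⟨ih1, ih2⟩ := ih
    rw [List.foldl_append]
    by_cases ha : a ∈ s
    · -- a seen before: bump the count at its stored index
      have hmem : a ∈ PySem.Set.ofList s := (PySem.Set.mem_ofList s a).mpr ha
      have hpos := ih2 a; rw [if_pos ha] at hpos
      have hidx : (PySem.Set.ofList s).idxOf a < (PySem.Set.ofList s).length :=
        List.idxOf_lt_length_of_mem hmem
      have hset : PySem.Set.ofList (s ++ [a]) = PySem.Set.ofList s := by
        rw [PySem.Set.ofList_append_singleton, PySem.Set.add_of_mem hmem]
      have hget : PySem.List.pyGet? (s.foldl pvStepB ([], PySem.Dict.empty)).1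
          (((PySem.Set.ofList s).idxOf a : Nat) : Int) = some (a, (s.count a : Int)) := by
        rw [PySem.List.pyGet?_natCast, ih1, List.getElem?_map,
          List.getElem?_eq_getElem hidx]
        simp [List.getElem_idxOf hidx]
      constructor
      · show (pvStepB (s.foldl pvStepB ([], PySem.Dict.empty)) a).1 = _
        simp only [pvStepB, hpos, hget]
        simp only [Int.toNat_natCast, hset]
        rw [ih1]
        apply List.ext_getElem
        · simp
        · intro j hj hj'
          rw [List.getElem_set]
          by_cases hja : (PySem.Set.ofList s).idxOf a = j
          · subst hja
            simp only [List.getElem_map]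
            rw [List.getElem_idxOf hidx]
            simp [List.count_append]
          · have hjlt : j < (PySem.Set.ofList s).length := by simpa using hj'
            have hne : (PySem.Set.ofList s)[j] ≠ a := by
              intro hEq
              exact hja (((PySem.Set.nodup_ofList s).getElem_inj_iff (hi := hidx) (hj := hjlt)).mp
                (by rw [hEq, List.getElem_idxOf hidx]))
            simp only [if_neg hja, List.getElem_map]
            simp [List.count_append, Ne.symm hne]
      · intro x
        show (pvStepB (s.foldl pvStepB ([], PySem.Dict.empty)) a).2.get? x = _
        simp only [pvStepB, hpos, hget]
        rw [ih2 x, hset]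
        by_cases hx : x ∈ s
        · simp [hx]
        · have : x ≠ a := fun h => hx (h ▸ ha)
          simp [hx, this]
    · -- first occurrence of a: append (a, 1) and record its index
      have hnmem : a ∉ PySem.Set.ofList s := fun h => ha ((PySem.Set.mem_ofList s a).mp h)
      have hpos := ih2 a; rw [if_neg ha] at hpos
      have hset : PySem.Set.ofList (s ++ [a]) = PySem.Set.ofList s ++ [a] := by
        rw [PySem.Set.ofList_append_singleton, PySem.Set.add_of_not_mem hnmem]
      constructor
      · show (pvStepB (s.foldl pvStepB ([], PySem.Dict.empty)) a).1 = _
        simp only [pvStepB, hpos]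
        rw [ih1, hset, List.map_append]
        congr 1
        · apply List.map_congr_left
          intro x hx
          have hxs : x ∈ s := (PySem.Set.mem_ofList s x).mp hx
          have hne : x ≠ a := fun h => ha (h ▸ hxs)
          simp [List.count_append, Ne.symm hne]
        · simp [List.count_append, List.count_eq_zero_of_not_mem ha]
      · intro x
        show (pvStepB (s.foldl pvStepB ([], PySem.Dict.empty)) a).2.get? x = _
        simp only [pvStepB, hpos]
        by_cases hxa : x = a
        · subst hxa
          rw [PySem.Dict.get?_insert_self, hset, List.idxOf_append_of_notMem hnmem]
          simp [ih1, List.mem_append]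
        · rw [PySem.Dict.get?_insert_of_ne _ _ hxa, ih2 x, hset]
          by_cases hx : x ∈ s
          · rw [if_pos hx, if_pos (by simp [hx]),
              List.idxOf_append_of_mem ((PySem.Set.mem_ofList s x).mpr hx)]
          · rw [if_neg hx, if_neg (by simp [hx, hxa])]

-- ===== VERDICT (by name: the statement is the Claim_ definition above) =====
theorem remove_occurrences_spec : Claim_equal_remove_occurrences := by
  intro xs _
  unfold Spec_remove_occurrences remove_occurrences remove_occurrences_alt
  simp only [stepA_eq_counter_step]
  rw [← PySem.Dict.counter_eq_foldl, (invB xs).1, PySem.Dict.items_counter,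
    PySem.List.foldl_append_singleton, List.nil_append]
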